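-- pv_equiv track=rewrite | github.com/santi-league/santi-league.github.io | mahjong_hand_analyzer.py | tiles_to_string
-- ===== SOURCE A (Python) =====
-- from typing import List, Tuple, Optional, Set, Dict, Any
--
-- def decode_tile(tile_num: int) -> Tuple[str, int]:
--     """
--     将牌谱中的数字编码转换为麻将牌
--     编码规则：
--     - 11-19: 1-9万 (m)
--     - 21-29: 1-9条 (p)
--     - 31-39: 1-9筒 (s)
--     - 41-47: 东南西北白发中 (z1-z7)
--
--     返回: (suit, rank)
--     - suit: 'm'(万), 'p'(条), 's'(筒), 'z'(字牌)
--     - rank: 1-9 (数牌) 或 1-7 (字牌)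
--     """
--     if tile_num == 0 or tile_num >= 60:
--         return ('unknown', 0)
--
--     tens = tile_num // 10
--     ones = tile_num % 10
--
--     if tens == 1 and 1 <= ones <= 9:
--         return ('m', ones)
--     elif tens == 2 and 1 <= ones <= 9:
--         return ('p', ones)
--     elif tens == 3 and 1 <= ones <= 9:
--         return ('s', ones)
--     elif tens == 4 and 1 <= ones <= 7:
--         return ('z', ones)
--     else:
--         return ('unknown', 0)
--
-- def tiles_to_string(tiles: List[int]) -> str:
--     """将牌列表转换为可读字符串，用于调试"""
--     decoded = [decode_tile(t) for t in tiles]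
--     result = []
--     for suit_name, suit_char in [('m', '万'), ('p', '条'), ('s', '筒'), ('z', '字')]:
--         suit_tiles = sorted([rank for s, rank in decoded if s == suit_name])
--         if suit_tiles:
--             result.append(''.join(map(str, suit_tiles)) + suit_char)
--     return ' '.join(result)
-- ===== SOURCE B (Python) =====
-- from typing import List, Tuple
--
-- def decode_tile(tile_num: int) -> Tuple[str, int]:
--     if tile_num == 0 or tile_num >= 60:
--         return ('unknown', 0)
--     tens = tile_num // 10
--     ones = tile_num % 10
--     if tens == 1 and 1 <= ones <= 9:
--         return ('m', ones)
--     elif tens == 2 and 1 <= ones <= 9: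
--         return ('p', ones)
--     elif tens == 3 and 1 <= ones <= 9:
--         return ('s', ones)
--     elif tens == 4 and 1 <= ones <= 7:
--         return ('z', ones)
--     else:
--         return ('unknown', 0)
--
-- def tiles_to_string(tiles: List[int]) -> str:
--     """Single counting pass: build a (suit, rank) -> count table, then emit
--     each suit's digit run directly from the table (no sorting, no filtering)."""
--     counts = {}
--     for t in tiles:
--         key = decode_tile(t)
--         counts[key] = counts.get(key, 0) + 1
--     parts = []
--     for s, ch in (('m', '万'), ('p', '条'), ('s', '筒'), ('z', '字')):
--         group = ''.join(str(r) * counts.get((s, r), 0) for r in range(1, 10))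
--         if group:
--             parts.append(group + ch)
--     return ' '.join(parts)
-- ===== Notes on version B (the rewrite author's own statement) =====
-- stated objective: alternative
-- what changed: Replaces the per-suit sorted()+filter passes with a single counting pass that builds a (suit,rank)->count dict over the tiles, then emits each suit's digit run directly from the table by iterating ranks 1..9 and repeating each digit by its count (no sorting, no per-suit filtering).
import Mathlib
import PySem

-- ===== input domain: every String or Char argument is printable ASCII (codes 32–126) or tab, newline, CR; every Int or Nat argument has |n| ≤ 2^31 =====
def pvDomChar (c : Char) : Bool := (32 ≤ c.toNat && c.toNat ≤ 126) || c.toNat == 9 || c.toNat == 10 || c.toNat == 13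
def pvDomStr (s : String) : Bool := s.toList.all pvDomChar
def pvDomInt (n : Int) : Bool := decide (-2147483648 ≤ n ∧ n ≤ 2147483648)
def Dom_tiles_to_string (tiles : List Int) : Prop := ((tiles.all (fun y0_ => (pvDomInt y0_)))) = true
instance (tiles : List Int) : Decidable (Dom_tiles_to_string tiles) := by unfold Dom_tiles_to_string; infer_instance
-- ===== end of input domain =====

-- B replaces A's per-suit sorted()+filter passes with one counting pass building a (suit,rank)->count dict,
-- then emits each suit's digit run straight from the table; objective: alternative.

-- ===== PORT A =====
-- shared helper: literal port of decode_tile (used unchanged by both Pythons)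
def decode_tile (tile_num : Int) : String × Int :=
  if tile_num = 0 ∨ tile_num ≥ 60 then ("unknown", 0)
  else
    let tens := PySem.Int.floordiv tile_num 10
    let ones := PySem.Int.mod tile_num 10
    if tens = 1 ∧ 1 ≤ ones ∧ ones ≤ 9 then ("m", ones)
    else if tens = 2 ∧ 1 ≤ ones ∧ ones ≤ 9 then ("p", ones)
    else if tens = 3 ∧ 1 ≤ ones ∧ ones ≤ 9 then ("s", ones)
    else if tens = 4 ∧ 1 ≤ ones ∧ ones ≤ 7 then ("z", ones)
    else ("unknown", 0)

def tiles_to_string (tiles : List Int) : String :=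
  let decoded := tiles.map decode_tile
  let result := [("m", ['万']), ("p", ['条']), ("s", ['筒']), ("z", ['字'])].foldl
    (fun (res : List (List Char)) (p : String × List Char) =>
      let suit_tiles := PySem.List.sorted
        ((decoded.filter (fun d => d.1 == p.1)).map (fun d => d.2)) (fun x => x) false
      if suit_tiles ≠ [] then
        res ++ [PySem.Chars.join [] (suit_tiles.map PySem.Int.toChars) ++ p.2]
      else res) []
  String.mk (PySem.Chars.join [' '] result)

-- ===== PORT B =====
def tiles_to_string_alt (tiles : List Int) : String :=
  let counts := tiles.foldl
    (fun (d : PySem.Dict (String × Int) Int) t =>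
      let key := decode_tile t
      d.insert key (d.getD key 0 + 1)) PySem.Dict.empty
  let parts := [("m", ['万']), ("p", ['条']), ("s", ['筒']), ("z", ['字'])].foldl
    (fun (res : List (List Char)) (p : String × List Char) =>
      let group := (PySem.List.pyRange 1 10 1).foldl
        (fun acc r => acc ++ PySem.List.pyRepeat (PySem.Int.toChars r) (counts.getD (p.1, r) 0)) []
      if group ≠ [] then res ++ [group ++ p.2] else res) []
  String.mk (PySem.Chars.join [' '] parts)

-- ===== PRECONDITION & SPEC =====
def Spec_tiles_to_string (tiles : List Int) (out : String) : Prop := out = tiles_to_string_alt tiles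
instance (tiles : List Int) (out : String) : Decidable (Spec_tiles_to_string tiles out) := by unfold Spec_tiles_to_string; infer_instance

-- ===== CLAIM (what is proved, stated in full; the proofs are below) =====
def Claim_equal_tiles_to_string : Prop := ∀ (tiles : List Int), Dom_tiles_to_string tiles → Spec_tiles_to_string tiles (tiles_to_string tiles)

-- ===== LEMMAS AND PROOFS =====

-- every decode_tile output is either the 'unknown' sentinel or has rank in 1..9
lemma decode_cases (t : Int) :
    decode_tile t = ("unknown", 0) ∨ (1 ≤ (decode_tile t).2 ∧ (decode_tile t).2 ≤ 9) := by
  unfold decode_tile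
  dsimp only
  split_ifs with h1 h2 h3 h4 h5
  · exact Or.inl rfl
  · exact Or.inr ⟨h2.2.1, h2.2.2⟩
  · exact Or.inr ⟨h3.2.1, h3.2.2⟩
  · exact Or.inr ⟨h4.2.1, h4.2.2⟩
  · obtain ⟨-, hlo, hhi⟩ := h5
    exact Or.inr ⟨hlo, by omega⟩
  · exact Or.inl rfl

-- joining with the empty separator is flattening
lemma join_nil_eq_flatten (parts : List (List Char)) :
    PySem.Chars.join [] parts = parts.flatten := by
  induction parts with
  | nil => rfl
  | cons p ps ih =>
    cases ps with
    | nil => simp [PySem.Chars.join_singleton]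
    | cons q qs => rw [PySem.Chars.join_cons_cons]; simp_all

-- sum over range of a single-hit ite equals the count
lemma sum_ite_count (rs : List Int) (v a : Int) (n : Nat) :
    ((List.range n).map (fun (k : Nat) => if v = a + (k : Int) then rs.count (a + (k : Int)) else 0)).sum
      = if a ≤ v ∧ v < a + (n : Int) then rs.count v else 0 := by
  induction n with
  | zero => rw [if_neg (by omega)]; simp
  | succ m ih =>
    rw [List.range_succ, List.map_append, List.sum_append, ih]
    simp only [List.map_cons, List.map_nil, List.sum_cons, List.sum_nil]
    by_cases hv : v = a + (m : Int)
    · subst hv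
      rw [if_neg (by omega), if_pos (by omega), if_pos (by push_cast; omega)]
      simp
    · rw [if_neg hv]
      by_cases h2 : a ≤ v ∧ v < a + (m : Int)
      · rw [if_pos h2, if_pos (by push_cast at *; omega)]; simp
      · rw [if_neg h2, if_neg (by push_cast at *; omega)]; simp

-- counting sort: sorted rs equals the concatenation of replicate-blocks for ranks a..a+n-1
lemma countsort (rs : List Int) (a : Int) (n : Nat)
    (h : ∀ x ∈ rs, a ≤ x ∧ x < a + (n : Int)) :
    PySem.List.sorted rs (fun x => x) false
      = ((List.range n).map (fun (k : Nat) => List.replicate (rs.count (a + (k : Int))) (a + (k : Int)))).flatten := by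
  apply PySem.List.sorted_id_eq_of_perm_of_pairwise
  · rw [List.perm_iff_count]
    intro v
    rw [List.count_flatten, List.map_map]
    have h1 : ((List.range n).map (List.count v ∘ fun (k : Nat) => List.replicate (rs.count (a + (k : Int))) (a + (k : Int)))).sum
        = ((List.range n).map (fun (k : Nat) => if v = a + (k : Int) then rs.count (a + (k : Int)) else 0)).sum := by
      congr 1
      apply List.map_congr_left
      intro k _
      simp only [Function.comp]
      rw [List.count_replicate]
      by_cases hv : v = a + (k : Int)
      · simp [hv]
      · rw [if_neg (show ¬((a + (k : Int) == v) = true) by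
          simp only [beq_iff_eq]
          exact fun h' => hv h'.symm), if_neg hv]
    rw [h1, sum_ite_count]
    split_ifs with hv
    · rfl
    · symm
      rw [List.count_eq_zero]
      intro hm
      exact hv (h v hm)
  · rw [List.pairwise_flatten]
    refine ⟨?_, ?_⟩
    · intro l hl
      simp only [List.mem_map] at hl
      obtain ⟨k, _, rfl⟩ := hl
      exact List.pairwise_replicate.mpr (Or.inr le_rfl)
    · rw [List.pairwise_map]
      apply List.Pairwise.imp ?_ (List.pairwise_lt_range (n := n))
      intro k1 k2 hk x hx y hy
      rw [List.eq_of_mem_replicate hx, List.eq_of_mem_replicate hy]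
      omega

-- the per-suit core: B's counting loop over ranks 1..9 emits exactly A's joined sorted digit run
lemma suit_group (decoded : List (String × Int)) (s : String)
    (hs : ∀ d ∈ decoded, d.1 = s → 1 ≤ d.2 ∧ d.2 ≤ 9) :
    (PySem.List.pyRange 1 10 1).foldl
        (fun acc r => acc ++ PySem.List.pyRepeat (PySem.Int.toChars r) ((decoded.count (s, r) : Int))) []
      = PySem.Chars.join []
          ((PySem.List.sorted ((decoded.filter (fun d => d.1 == s)).map (fun d => d.2)) (fun x => x) false).map
            PySem.Int.toChars) := by
  set rs := (decoded.filter (fun d => d.1 == s)).map (fun d => d.2) with hrs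
  have hb : ∀ x ∈ rs, (1:Int) ≤ x ∧ x < 1 + ((9:Nat) : Int) := by
    intro x hx
    rw [hrs] at hx
    simp only [List.mem_map, List.mem_filter] at hx
    obtain ⟨d, ⟨hd, hds⟩, rfl⟩ := hx
    have := hs d hd (by simpa using hds)
    push_cast
    omega
  have hc : ∀ r : Int, rs.count r = decoded.count (s, r) := by
    intro r
    rw [hrs, List.count_eq_countP, List.countP_map, List.countP_filter, List.count_eq_countP]
    apply List.countP_congr
    intro d _
    cases d with
    | mk d1 d2 => simp [Function.comp, Prod.ext_iff, and_comm]
  rw [join_nil_eq_flatten, countsort rs 1 9 hb, ← List.flatMap_def,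
      PySem.List.foldl_append_eq_flatMap, List.nil_append]
  have hrange : PySem.List.pyRange 1 10 1 = (List.range 9).map (fun (k : Nat) => (1 : Int) + (k : Int)) := by decide
  rw [hrange, List.flatMap_map]
  rw [show (((List.range 9).map (fun (k : Nat) => List.replicate (rs.count (1 + (k : Int))) (1 + (k : Int)))).flatten).flatMap PySem.Int.toChars
      = (List.range 9).flatMap (fun (k : Nat) => (List.replicate (rs.count (1 + (k : Int))) (1 + (k : Int))).flatMap PySem.Int.toChars) from by
    simp [List.flatMap_def, List.map_flatten, List.flatten_flatten, Function.comp_def]]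
  simp only [List.flatMap_def]
  congr 1
  apply List.map_congr_left
  intro k _
  simp [PySem.List.pyRepeat, List.map_replicate, hc]

-- membership bound for a suit's sorted rank list
lemma join_ne_nil_iff (st : List Int) (h : ∀ x ∈ st, 1 ≤ x ∧ x ≤ 9) :
    (PySem.Chars.join [] (st.map PySem.Int.toChars) = []) ↔ st = [] := by
  rw [join_nil_eq_flatten, ← List.flatMap_def, List.flatMap_eq_nil_iff]
  constructor
  · intro hall
    cases st with
    | nil => rfl
    | cons x xs =>
      obtain ⟨h1, h9⟩ := h x (by simp)
      have hne : PySem.Int.toChars x ≠ [] := by interval_cases x <;> decide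
      exact absurd (hall x (by simp)) hne
  · intro h'; subst h'; simp

-- ===== VERDICT (by name: the statement is the Claim_ definition above) =====
theorem tiles_to_string_spec : Claim_equal_tiles_to_string := by
  intro tiles _
  unfold Spec_tiles_to_string tiles_to_string tiles_to_string_alt
  have hcount : ∀ v, (tiles.foldl
      (fun (d : PySem.Dict (String × Int) Int) t =>
        let key := decode_tile t
        d.insert key (d.getD key 0 + 1)) PySem.Dict.empty).getD v 0
      = ((tiles.map decode_tile).count v : Int) := by
    intro v
    have h1 : (tiles.foldl
        (fun (d : PySem.Dict (String × Int) Int) t =>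
          let key := decode_tile t
          d.insert key (d.getD key 0 + 1)) PySem.Dict.empty)
        = (tiles.map decode_tile).foldl
            (fun (d : PySem.Dict (String × Int) Int) x => d.insert x (d.getD x 0 + 1)) PySem.Dict.empty := by
      rw [List.foldl_map]
    rw [h1, PySem.Dict.getD_foldl_insert_add_one, PySem.Dict.getD_empty]
    ring
  simp only [hcount]
  congr 1
  apply congrArg
  apply PySem.List.foldl_congr_mem
  intro acc p hp
  have hsuit : p.1 ≠ "unknown" := by
    fin_cases hp <;> decide
  have hs : ∀ d ∈ tiles.map decode_tile, d.1 = p.1 → 1 ≤ d.2 ∧ d.2 ≤ 9 := by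
    intro d hd h1
    simp only [List.mem_map] at hd
    obtain ⟨t, _, rfl⟩ := hd
    rcases decode_cases t with h | h
    · rw [h] at h1
      exact absurd h1.symm hsuit
    · exact h
  rw [suit_group (tiles.map decode_tile) p.1 hs]
  set st := PySem.List.sorted (((tiles.map decode_tile).filter (fun d => d.1 == p.1)).map (fun d => d.2)) (fun x => x) false with hst
  have hb : ∀ x ∈ st, 1 ≤ x ∧ x ≤ 9 := by
    intro x hx
    have hx' : x ∈ ((tiles.map decode_tile).filter (fun d => d.1 == p.1)).map (fun d => d.2) :=
      (PySem.List.sorted_perm _ _ _).mem_iff.mp hx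
    simp only [List.mem_map, List.mem_filter] at hx'
    obtain ⟨d, ⟨hd, hds⟩, rfl⟩ := hx'
    obtain ⟨a, ha, rfl⟩ := hd
    exact hs (decode_tile a) (List.mem_map.mpr ⟨a, ha, rfl⟩) (by simpa using hds)
  by_cases hempty : st = []
  · rw [if_neg (not_not_intro hempty), if_neg (not_not_intro ((join_ne_nil_iff st hb).mpr hempty))]
  · rw [if_pos hempty, if_pos (fun h => hempty ((join_ne_nil_iff st hb).mp h))]
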